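-- pv_equiv track=rewrite | github.com/pypi-data/pypi-mirror-334 | packages/iprm/iprm-0.0.1rc6.tar.gz/iprm-0.0.1rc6/src/iprm/api/obj/target.py | _parse_standard_version_output
-- ===== SOURCE A (Python) =====
-- def _parse_standard_version_output(output: str) -> str:
--     lines = []
--     for line in output.split("\n"):
--         if line.strip() and not line.startswith("###"):
--             lines.append(line)
--         elif line.startswith("###"):
--             break
--     return "\n".join(lines).strip()
-- ===== SOURCE B (Python) =====
-- def _parse_standard_version_output(output: str) -> str:
--     ls = output.split("\n")
--     idx = next((i for i, l in enumerate(ls) if l.startswith("###")), len(ls))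
--     kept = [l for l in ls[:idx] if l.strip()]
--     return "\n".join(kept).strip()
-- ===== Notes on version B (the rewrite author's own statement) =====
-- stated objective: alternative
-- what changed: Replaces the single interleaved append/break loop with a two-phase decomposition: first locate the index of the first marker line, then slice the prefix, filter out whitespace-only lines with a comprehension, join and strip.
import Mathlib
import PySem

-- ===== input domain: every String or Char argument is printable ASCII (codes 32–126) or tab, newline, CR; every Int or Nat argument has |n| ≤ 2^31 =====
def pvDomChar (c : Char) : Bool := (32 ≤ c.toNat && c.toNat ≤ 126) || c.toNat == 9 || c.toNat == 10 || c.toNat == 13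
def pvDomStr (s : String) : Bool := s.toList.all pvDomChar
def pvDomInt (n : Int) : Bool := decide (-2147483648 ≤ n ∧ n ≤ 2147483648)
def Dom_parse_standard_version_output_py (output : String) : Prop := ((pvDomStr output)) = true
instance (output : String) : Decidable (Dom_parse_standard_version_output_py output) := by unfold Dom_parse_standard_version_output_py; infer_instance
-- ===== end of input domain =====

-- B replaces A's interleaved append/break loop with a two-phase decomposition
-- (find the '###' boundary index, then filter/join the prefix); alternative, same cost.


-- ===== PORT A =====
-- the for-loop with break: accumulates lines, stops at the first '###' line
def pvALoop : List String → List String → List String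
  | [], lines => lines
  | line :: rest, lines =>
    if PySem.Str.strip line != "" && !PySem.Str.startswith line "###" then
      pvALoop rest (lines ++ [line])
    else if PySem.Str.startswith line "###" then
      lines
    else
      pvALoop rest lines

def parse_standard_version_output_py (output : String) : String :=
  PySem.Str.strip (PySem.Str.join "\n" (pvALoop (((PySem.Str.split? output "\n").getD [])) []))

-- ===== PORT B =====
-- next((i for i, l in enumerate(ls) if l.startswith("###")), len(ls))
def pvBIdx : List String → Nat
  | [] => 0
  | l :: rest => if PySem.Str.startswith l "###" then 0 else 1 + pvBIdx rest

def parse_standard_version_output_py_alt (output : String) : String :=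
  let ls := ((PySem.Str.split? output "\n").getD [])
  let idx := pvBIdx ls
  let kept := (ls.take idx).filter (fun l => PySem.Str.strip l != "")
  PySem.Str.strip (PySem.Str.join "\n" kept)

-- ===== PRECONDITION & SPEC =====
def Spec_parse_standard_version_output_py (output : String) (out : String) : Prop := out = parse_standard_version_output_py_alt output
instance (output : String) (out : String) : Decidable (Spec_parse_standard_version_output_py output out) := by unfold Spec_parse_standard_version_output_py; infer_instance

-- ===== CLAIM (what is proved, stated in full; the proofs are below) =====
def Claim_equal_parse_standard_version_output_py : Prop := ∀ (output : String), Dom_parse_standard_version_output_py output → Spec_parse_standard_version_output_py output (parse_standard_version_output_py output)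

-- ===== LEMMAS AND PROOFS =====
lemma pvALoop_eq (ls acc : List String) :
    pvALoop ls acc = acc ++ (ls.take (pvBIdx ls)).filter (fun l => PySem.Str.strip l != "") := by
  induction ls generalizing acc with
  | nil => simp [pvALoop, pvBIdx]
  | cons l rest ih =>
    by_cases hsw : PySem.Chars.startswith l.toList ['#', '#', '#'] = true
    · simp [pvALoop, pvBIdx, hsw]
    · by_cases hst : PySem.Str.strip l != ""
      · simp [pvALoop, pvBIdx, hsw, hst, ih, Nat.add_comm 1 (pvBIdx rest)]
      · simp [pvALoop, pvBIdx, hsw, hst, ih, Nat.add_comm 1 (pvBIdx rest)]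

-- ===== VERDICT (by name: the statement is the Claim_ definition above) =====
theorem parse_standard_version_output_py_spec : Claim_equal_parse_standard_version_output_py := by
  intro output _
  unfold Spec_parse_standard_version_output_py parse_standard_version_output_py parse_standard_version_output_py_alt
  rw [pvALoop_eq]
  simp
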